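-- pv_equiv track=rewrite | github.com/A-Saavedra/Codigo-Control-NASM | ImplementacionPython/generador_codigo_control.py | base64_custom_encode
-- ===== SOURCE A (Python) =====
-- BASE64_DICT = "0123456789ABCDEFGHIJKLMNOPQRSTUVWXYZabcdefghijklmnopqrstuvwxyz+/"
--
-- def base64_custom_encode(number: int) -> str:
--     if number == 0:
--         return BASE64_DICT[0]
--     result = ""
--     while number > 0:
--         result = BASE64_DICT[number % 64] + result
--         number //= 64
--     return result
-- ===== SOURCE B (Python) =====
-- BASE64_DICT = "0123456789ABCDEFGHIJKLMNOPQRSTUVWXYZabcdefghijklmnopqrstuvwxyz+/"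
--
-- def base64_custom_encode(number: int) -> str:
--     if number <= 0:
--         return BASE64_DICT[0] if number == 0 else ""
--     # find the highest power of 64 not exceeding number, then emit digits
--     # most-significant first by dividing by descending powers
--     p = 1
--     while p * 64 <= number:
--         p *= 64
--     out = []
--     while p > 0:
--         out.append(BASE64_DICT[number // p % 64])
--         p //= 64
--     return "".join(out)
-- ===== Notes on version B (the rewrite author's own statement) =====
-- stated objective: alternative
-- what changed: A builds the string least-significant-digit first, prepending into an accumulator while dividing the number; B first scans for the highest power of 64 not exceeding the input and then emits digits most-significant first by dividing by descending powers, joining an appended list.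
import Mathlib
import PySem

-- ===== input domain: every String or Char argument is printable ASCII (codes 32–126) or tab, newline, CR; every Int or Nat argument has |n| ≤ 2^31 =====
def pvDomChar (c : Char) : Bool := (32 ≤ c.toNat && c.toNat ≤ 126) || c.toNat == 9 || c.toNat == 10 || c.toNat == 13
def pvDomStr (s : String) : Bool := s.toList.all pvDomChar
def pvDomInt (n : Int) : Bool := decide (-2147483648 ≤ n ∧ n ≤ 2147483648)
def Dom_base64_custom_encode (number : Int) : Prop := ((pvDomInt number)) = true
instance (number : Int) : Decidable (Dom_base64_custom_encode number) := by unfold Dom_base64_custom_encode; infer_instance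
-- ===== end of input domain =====

-- B replaces A's least-significant-first prepend loop by a two-pass scheme: first find
-- the highest power of 64 not exceeding the input, then emit digits most-significant
-- first by dividing by descending powers (alternative decomposition, same cost).

-- BASE64_DICT as its list of code points (shared constant of the module)
def pvBase64Dict : List Char :=
  "0123456789ABCDEFGHIJKLMNOPQRSTUVWXYZabcdefghijklmnopqrstuvwxyz+/".toList

-- ===== PORT A =====
-- the while-loop: result = BASE64_DICT[number % 64] + result; number //= 64
def pvEncodeLoop (number : Int) (result : List Char) : List Char :=
  if 0 < number then
    pvEncodeLoop (PySem.Int.floordiv number 64)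
      ((PySem.Chars.pyGet? pvBase64Dict (PySem.Int.mod number 64)).toList ++ result)
  else result
termination_by number.toNat
decreasing_by
  have h64 : PySem.Int.floordiv number 64 = number / 64 :=
    PySem.Int.floordiv_eq_ediv_of_pos (by omega)
  rw [h64]; omega

def base64_custom_encode (number : Int) : String :=
  if number = 0 then String.ofList (PySem.Chars.pyGet? pvBase64Dict 0).toList
  else String.ofList (pvEncodeLoop number [])

-- ===== PORT B =====
-- first loop: while p * 64 <= number: p *= 64
-- (the extra '0 < p' in the guard is only for totality: in every call p ≥ 1)
def pvFindPow (number : Int) (p : Int) : Int :=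
  if h : 0 < p ∧ p * 64 ≤ number then pvFindPow number (p * 64) else p
termination_by (number - p).toNat
decreasing_by omega

-- second loop: while p > 0: out.append(BASE64_DICT[number // p % 64]); p //= 64
def pvBuildLoop (number p : Int) (out : List Char) : List Char :=
  if 0 < p then
    pvBuildLoop number (PySem.Int.floordiv p 64)
      (out ++ (PySem.Chars.pyGet? pvBase64Dict
        (PySem.Int.mod (PySem.Int.floordiv number p) 64)).toList)
  else out
termination_by p.toNat
decreasing_by
  have h64 : PySem.Int.floordiv p 64 = p / 64 :=
    PySem.Int.floordiv_eq_ediv_of_pos (by omega)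
  rw [h64]; omega

def base64_custom_encode_alt (number : Int) : String :=
  if number ≤ 0 then
    if number = 0 then String.ofList (PySem.Chars.pyGet? pvBase64Dict 0).toList else ""
  else String.ofList (pvBuildLoop number (pvFindPow number 1) [])

-- ===== PRECONDITION & SPEC =====
def Spec_base64_custom_encode (number : Int) (out : String) : Prop := out = base64_custom_encode_alt number
instance (number : Int) (out : String) : Decidable (Spec_base64_custom_encode number out) := by unfold Spec_base64_custom_encode; infer_instance

-- ===== CLAIM (what is proved, stated in full; the proofs are below) =====
def Claim_equal_base64_custom_encode : Prop := ∀ (number : Int), Dom_base64_custom_encode number → Spec_base64_custom_encode number (base64_custom_encode number)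

-- ===== LEMMAS AND PROOFS =====

-- one base-64 digit character (proof-side abbreviation)
def pvIdx (m : Int) : List Char := (PySem.Chars.pyGet? pvBase64Dict m).toList

-- reference: the digit string of n, least-significant digit appended last
def pvDg (n : Int) : List Char :=
  if n ≤ 0 then [] else pvDg (n / 64) ++ pvIdx (n % 64)
termination_by n.toNat
decreasing_by omega

-- fixed-width digit string: digits at 64^k … 64^0, most-significant first
def pvF (n : Int) : Nat → List Char
  | 0 => pvIdx (n % 64)
  | (k+1) => pvIdx (n / 64 ^ (k+1) % 64) ++ pvF n k

theorem pvEncodeLoop_eq (k : Nat) :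
    ∀ (n : Int), n.toNat ≤ k → ∀ (result : List Char),
      pvEncodeLoop n result = pvDg n ++ result := by
  induction k with
  | zero =>
    intro n hn result
    rw [pvEncodeLoop, pvDg]
    simp only [show ¬ (0 < n) by omega, show n ≤ 0 by omega]
    simp
  | succ k ih =>
    intro n hn result
    rw [pvEncodeLoop, pvDg]
    by_cases h : 0 < n
    · rw [if_pos h, if_neg (by omega)]
      have h64 : PySem.Int.floordiv n 64 = n / 64 :=
        PySem.Int.floordiv_eq_ediv_of_pos (by omega)
      have hm : PySem.Int.mod n 64 = n % 64 :=
        PySem.Int.mod_eq_emod_of_pos (by omega)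
      rw [h64, hm, ih (n / 64) (by omega)]
      simp [pvIdx, List.append_assoc]
    · rw [if_neg h, if_pos (by omega)]
      simp

theorem pvBuildLoop_eq (k : Nat) :
    ∀ (n : Int), 0 < n → ∀ (out : List Char),
      pvBuildLoop n (64 ^ k) out = out ++ pvF n k := by
  induction k with
  | zero =>
    intro n hn out
    rw [pvBuildLoop]
    rw [if_pos (by norm_num)]
    rw [pvBuildLoop]
    have h1 : PySem.Int.floordiv n (64 ^ (0:Nat)) = n := by
      rw [show ((64:Int) ^ (0:Nat)) = 1 by norm_num,
        PySem.Int.floordiv_eq_ediv_of_pos (by omega)]; omega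
    have h2 : PySem.Int.floordiv ((64:Int) ^ (0:Nat)) 64 = 0 := by
      rw [show ((64:Int) ^ (0:Nat)) = 1 by norm_num,
        PySem.Int.floordiv_eq_ediv_of_pos (by omega)]; decide
    rw [h1, h2, if_neg (by omega),
      PySem.Int.mod_eq_emod_of_pos (a := n) (by omega)]
    simp [pvF, pvIdx]
  | succ k ih =>
    intro n hn out
    rw [pvBuildLoop]
    have hp : (0:Int) < 64 ^ (k+1) := by positivity
    rw [if_pos hp]
    have h64 : PySem.Int.floordiv ((64:Int) ^ (k+1)) 64 = 64 ^ k := by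
      rw [PySem.Int.floordiv_eq_ediv_of_pos (by omega), pow_succ]
      exact Int.mul_ediv_cancel _ (by omega)
    have hd : PySem.Int.floordiv n (64 ^ (k+1)) = n / 64 ^ (k+1) :=
      PySem.Int.floordiv_eq_ediv_of_pos hp
    have hm : PySem.Int.mod (n / 64 ^ (k+1)) 64 = n / 64 ^ (k+1) % 64 :=
      PySem.Int.mod_eq_emod_of_pos (by omega)
    rw [h64, hd, hm, ih n hn]
    simp [pvF, pvIdx, List.append_assoc]

theorem pvF_shift (k : Nat) : ∀ (n : Int), pvF n (k+1) = pvF (n / 64) k ++ pvIdx (n % 64) := by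
  induction k with
  | zero =>
    intro n
    simp [pvF]
  | succ k ih =>
    intro n
    have hdd : n / 64 / 64 ^ (k+1) = n / 64 ^ (k+1+1) := by
      rw [Int.ediv_ediv_of_nonneg (by norm_num), ← pow_succ']
    calc pvF n (k+1+1) = pvIdx (n / 64 ^ (k+1+1) % 64) ++ pvF n (k+1) := rfl
      _ = pvIdx (n / 64 ^ (k+1+1) % 64) ++ (pvF (n / 64) k ++ pvIdx (n % 64)) := by rw [ih]
      _ = (pvIdx (n / 64 / 64 ^ (k+1) % 64) ++ pvF (n / 64) k) ++ pvIdx (n % 64) := by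
            rw [hdd]; simp [List.append_assoc]
      _ = pvF (n / 64) (k+1) ++ pvIdx (n % 64) := rfl

theorem pvDg_eq_pvF (k : Nat) :
    ∀ (n : Int), 64 ^ k ≤ n → n < 64 ^ (k+1) → pvDg n = pvF n k := by
  induction k with
  | zero =>
    intro n h1 h2
    simp only [pow_zero] at h1 h2
    rw [pvDg, if_neg (by omega)]
    have hq : n / 64 = 0 := by omega
    rw [hq, pvDg]
    simp [pvF]
  | succ k ih =>
    intro n h1 h2
    have hpos : (0:Int) < n := lt_of_lt_of_le (by positivity) h1
    rw [pvDg, if_neg (by omega)]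
    have hlo : 64 ^ k ≤ n / 64 := by
      rw [Int.le_ediv_iff_mul_le (by omega)]
      calc (64:Int) ^ k * 64 = 64 ^ (k+1) := by rw [pow_succ]
        _ ≤ n := h1
    have hhi : n / 64 < 64 ^ (k+1) := by
      rw [Int.ediv_lt_iff_lt_mul (by omega)]
      calc n < 64 ^ (k+1+1) := h2
        _ = 64 ^ (k+1) * 64 := by rw [pow_succ]
    rw [ih (n / 64) hlo hhi, ← pvF_shift]

theorem pvFindPow_spec (m : Nat) :
    ∀ (j : Nat) (n : Int), 0 < n → n < 64 ^ (j + m) → 64 ^ j ≤ n →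
      ∃ k, pvFindPow n (64 ^ j) = 64 ^ k ∧ 64 ^ k ≤ n ∧ n < 64 ^ (k+1) := by
  induction m with
  | zero =>
    intro j n hn h2 h3
    simp only [Nat.add_zero] at h2
    omega
  | succ m ih =>
    intro j n hn h2 h3
    rw [pvFindPow]
    by_cases h : (64:Int) ^ j * 64 ≤ n
    · rw [dif_pos ⟨by positivity, h⟩]
      have : (64:Int) ^ j * 64 = 64 ^ (j+1) := by rw [pow_succ]
      rw [this]
      exact ih (j+1) n hn (by rw [show j+1+m = j+(m+1) by omega]; exact h2) (by omega)
    · rw [dif_neg (fun hc => h hc.2)]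
      exact ⟨j, rfl, h3, by rw [pow_succ]; omega⟩

-- ===== VERDICT (by name: the statement is the Claim_ definition above) =====
theorem base64_custom_encode_spec : Claim_equal_base64_custom_encode := by
  intro number hdom
  unfold Spec_base64_custom_encode base64_custom_encode base64_custom_encode_alt
  by_cases h0 : number = 0
  · simp [h0]
  · rw [if_neg h0]
    by_cases hneg : number ≤ 0
    · rw [if_pos hneg, if_neg h0, pvEncodeLoop,
        if_neg (show ¬ (0:Int) < number by omega)]
    · rw [if_neg hneg]
      have hn : 0 < number := by omega
      have hbound : number < 64 ^ (0 + 7) := by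
        have : number ≤ 2147483648 := by
          unfold Dom_base64_custom_encode pvDomInt at hdom
          simp at hdom; omega
        norm_num; omega
      obtain ⟨k, hp, hk1, hk2⟩ := pvFindPow_spec 7 0 number hn hbound (by norm_num; omega)
      rw [show (1:Int) = 64 ^ (0:Nat) by norm_num, hp,
        pvBuildLoop_eq k number hn [],
        pvEncodeLoop_eq number.toNat number (le_refl _) []]
      rw [pvDg_eq_pvF k number hk1 hk2]
      simp
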